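-- pv_equiv track=rewrite | github.com/andrem08/my-test | EXTENSION_SERVER/manage_cc_report.py | group_equal_dicts
-- ===== SOURCE A (Python) =====
-- def are_equal_dicts(dict1, dict2):
--     return dict1 == dict2
--
-- def group_equal_dicts(arr):
--     grouped_dicts = []
--     index = 0
--     while arr:
--         current_dict = arr.pop(0)
--         group = [{"index": index, **current_dict}]
--         for other_dict in arr[:]:
--             if are_equal_dicts(current_dict, other_dict):
--                 group.append({"index": index, **other_dict})
--                 arr.remove(other_dict)
--         grouped_dicts.append(group)
--         index += 1
--     return grouped_dicts
-- ===== SOURCE B (Python) =====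
-- def group_equal_dicts(arr):
--     # Single pass: bucket dicts by a canonical key (items sorted by key), in
--     # first-occurrence order, then tag each group with its index.
--     # Note: unlike the original, this does not consume `arr` in place.
--     table = {}
--     groups = []
--     for d in arr:
--         k = tuple(sorted(d.items(), key=lambda kv: kv[0]))
--         if k in table:
--             groups[table[k]].append(d)
--         else:
--             table[k] = len(groups)
--             groups.append([d])
--     return [[{"index": i, **d} for d in g] for i, g in enumerate(groups)]
-- ===== Notes on version B (the rewrite author's own statement) =====
-- stated objective: alternative
-- what changed: A repeatedly pops the first dict and rescans-and-removes its equals from the rest of the list (repeated pop/scan/remove passes, mutating the input); B makes a single pass, bucketing each dict into a hash table keyed by its canonically sorted items, then tags the groups by enumeration, without mutating the input.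
import Mathlib
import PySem

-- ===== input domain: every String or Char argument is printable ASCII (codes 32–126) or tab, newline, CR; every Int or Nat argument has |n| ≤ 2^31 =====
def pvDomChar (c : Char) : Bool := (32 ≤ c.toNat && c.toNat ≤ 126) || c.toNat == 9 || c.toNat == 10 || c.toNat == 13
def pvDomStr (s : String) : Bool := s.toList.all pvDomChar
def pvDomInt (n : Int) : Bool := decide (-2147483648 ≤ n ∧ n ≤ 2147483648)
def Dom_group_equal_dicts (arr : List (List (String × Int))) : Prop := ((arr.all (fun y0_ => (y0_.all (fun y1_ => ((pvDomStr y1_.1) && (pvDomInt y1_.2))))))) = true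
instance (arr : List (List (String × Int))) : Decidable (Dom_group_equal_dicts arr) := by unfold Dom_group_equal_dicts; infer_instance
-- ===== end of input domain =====

-- B replaces A's repeated pop/scan/remove grouping by a single pass that buckets each dict
-- under a canonical key (items sorted by key); equivalence is about the RETURN value only —
-- A empties its argument list in place (pop/remove), B does not mutate it.

-- ===== PORT A =====
-- Python `dict1 == dict2` (order-insensitive: same keys, same values); hand-ported, exact.
def pvEqD (a b : PySem.Dict String Int) : Bool :=
  (a.items.all (fun kv => b.get? kv.1 == some kv.2)) &&
  (b.items.all (fun kv => a.get? kv.1 == some kv.2))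

-- `{"index": i, **d}`: "index" inserted first, then d's items overwrite in place = Dict.ofList.
def pvTag (i : Int) (d : PySem.Dict String Int) : List (String × Int) :=
  (PySem.Dict.ofList (("index", i) :: d.items)).items

-- `arr.remove(o)`: drop the first element `== o` (Python dict equality, so hand-ported;
-- in A `o` is always present, so the not-found ValueError branch is unreachable).
def pvRemove (arr : List (PySem.Dict String Int)) (o : PySem.Dict String Int) :
    List (PySem.Dict String Int) :=
  match arr with
  | [] => []
  | x :: xs => if pvEqD x o then xs else x :: pvRemove xs o

theorem pvRemove_length_le (arr : List (PySem.Dict String Int)) (o : PySem.Dict String Int) :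
    (pvRemove arr o).length ≤ arr.length := by
  induction arr with
  | nil => simp [pvRemove]
  | cons x xs ih => simp only [pvRemove]; split <;> simp <;> omega

-- the `for other_dict in arr[:]` loop: iterates over a snapshot `copy`, mutating `arr`.
def pvInner (copy : List (PySem.Dict String Int)) (arr : List (PySem.Dict String Int))
    (cur : PySem.Dict String Int) (i : Int) (grp : List (List (String × Int))) :
    List (List (String × Int)) × List (PySem.Dict String Int) :=
  match copy with
  | [] => (grp, arr)
  | o :: rest =>
    if pvEqD cur o then pvInner rest (pvRemove arr o) cur i (grp ++ [pvTag i o])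
    else pvInner rest arr cur i grp

theorem pvInner_length_le (copy arr : List (PySem.Dict String Int))
    (cur : PySem.Dict String Int) (i : Int) (grp : List (List (String × Int))) :
    (pvInner copy arr cur i grp).2.length ≤ arr.length := by
  induction copy generalizing arr grp with
  | nil => simp [pvInner]
  | cons o rest ih =>
    simp only [pvInner]; split
    · exact le_trans (ih _ _) (pvRemove_length_le _ _)
    · exact ih _ _

-- the `while arr:` loop (pop(0), build group, recurse on what is left).
def pvOuter (arr : List (PySem.Dict String Int)) (i : Int) :
    List (List (List (String × Int))) :=
  match arr with
  | [] => []
  | c :: rest =>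
    let r := pvInner rest rest c i [pvTag i c]
    r.1 :: pvOuter r.2 (i + 1)
termination_by arr.length
decreasing_by
  have := pvInner_length_le rest rest c i [pvTag i c]
  simp; omega

-- entry: each Python dict argument is its assoc list; dict construction = Dict.ofList
-- (collapses duplicate keys exactly as dict() would).
def group_equal_dicts (arr : List (List (String × Int))) : List (List (List (String × Int))) :=
  pvOuter (arr.map PySem.Dict.ofList) 0

-- ===== PORT B =====
-- canonical key: tuple(sorted(d.items(), key=lambda kv: kv[0]))
def pvKey (d : PySem.Dict String Int) : List (String × Int) :=
  PySem.List.sorted d.items (fun kv => kv.1) false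

-- the single bucketing pass over arr (table: key -> group position, groups in first-seen order).
def pvBLoop : List (PySem.Dict String Int) → PySem.Dict (List (String × Int)) Int →
    List (List (PySem.Dict String Int)) → List (List (PySem.Dict String Int))
  | [], _, groups => groups
  | d :: rest, table, groups =>
    let k := pvKey d
    if table.contains k then
      let i := table.getD k 0
      pvBLoop rest table (PySem.List.pySetD groups i (PySem.List.pyGetD groups i [] ++ [d]))
    else
      pvBLoop rest (table.insert k (PySem.List.len groups)) (groups ++ [[d]])

def group_equal_dicts_alt (arr : List (List (String × Int))) :
    List (List (List (String × Int))) :=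
  (PySem.List.enumerate (pvBLoop (arr.map PySem.Dict.ofList) PySem.Dict.empty []) 0).map
    (fun ig => ig.2.map (fun d => pvTag ig.1 d))

-- ===== PRECONDITION & SPEC =====
def Spec_group_equal_dicts (arr : List (List (String × Int))) (out : List (List (List (String × Int)))) : Prop := out = group_equal_dicts_alt arr
instance (arr : List (List (String × Int))) (out : List (List (List (String × Int)))) : Decidable (Spec_group_equal_dicts arr out) := by unfold Spec_group_equal_dicts; infer_instance

-- ===== CLAIM (what is proved, stated in full; the proofs are below) =====
def Claim_equal_group_equal_dicts : Prop := ∀ (arr : List (List (String × Int))), Dom_group_equal_dicts arr → Spec_group_equal_dicts arr (group_equal_dicts arr)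

-- ===== LEMMAS AND PROOFS =====


-- Python dict equality is equality of the item multisets (keys are unique).
theorem eqD_iff_perm (a b : PySem.Dict String Int)
    (ha : a.keys.Nodup) (hb : b.keys.Nodup) :
    pvEqD a b = true ↔ a.items.Perm b.items := by
  have ha' : a.items.Nodup := List.Nodup.of_map _ ha
  have hb' : b.items.Nodup := List.Nodup.of_map _ hb
  constructor
  · intro h
    simp only [pvEqD, Bool.and_eq_true, List.all_eq_true, beq_iff_eq] at h
    obtain ⟨h1, h2⟩ := h
    refine (List.perm_ext_iff_of_nodup ha' hb').mpr ?_
    rintro ⟨k, v⟩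
    constructor
    · intro hm; exact PySem.Dict.mem_items_of_get?_eq_some b (h1 (k, v) hm)
    · intro hm; exact PySem.Dict.mem_items_of_get?_eq_some a (h2 (k, v) hm)
  · intro hp
    simp only [pvEqD, Bool.and_eq_true, List.all_eq_true, beq_iff_eq]
    constructor
    · rintro ⟨k, v⟩ hm; exact PySem.Dict.get?_of_mem_items b (hp.mem_iff.mp hm) hb
    · rintro ⟨k, v⟩ hm; exact PySem.Dict.get?_of_mem_items a (hp.mem_iff.mpr hm) ha

-- two dicts have the same canonical key iff their items are a permutation of each other.
theorem key_eq_iff_perm (a b : PySem.Dict String Int)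
    (ha : a.keys.Nodup) (hb : b.keys.Nodup) :
    pvKey a = pvKey b ↔ a.items.Perm b.items := by
  constructor
  · intro h
    exact ((PySem.List.sorted_perm a.items (fun kv => kv.1) false).symm.trans
      (h ▸ PySem.List.sorted_perm b.items (fun kv => kv.1) false : (pvKey a).Perm b.items))
  · intro hp
    have hperm : (pvKey b).Perm a.items :=
      (PySem.List.sorted_perm b.items (fun kv => kv.1) false).trans hp.symm
    have hle : List.Pairwise (fun p q : String × Int => p.1 ≤ q.1) (pvKey b) :=
      PySem.List.sorted_pairwise b.items (fun kv => kv.1)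
    have hnd : ((pvKey b).map (fun kv => kv.1)).Nodup := by
      have := (PySem.List.sorted_perm b.items (fun kv => kv.1) false).map (fun kv => kv.1)
      exact (List.Perm.nodup_iff this).mpr hb
    have hne : List.Pairwise (fun p q : String × Int => p.1 ≠ q.1) (pvKey b) :=
      List.pairwise_map.mp hnd
    exact PySem.List.sorted_eq_of_perm_of_pairwise_lt a.items (pvKey b) (fun kv => kv.1)
      hperm ((hle.and hne).imp (fun h => lt_of_le_of_ne h.1 h.2))

theorem eqD_eq_beq_key (a b : PySem.Dict String Int)
    (ha : a.keys.Nodup) (hb : b.keys.Nodup) :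
    pvEqD a b = (pvKey a == pvKey b) := by
  rw [Bool.eq_iff_iff, eqD_iff_perm a b ha hb, beq_iff_eq, key_eq_iff_perm a b ha hb]

-- first-occurrence list of the distinct keys
def reps : List (List (String × Int)) → List (List (String × Int))
  | [] => []
  | k :: ks => k :: reps (ks.filter (fun k' => !(k' == k)))
termination_by l => l.length
decreasing_by
  simp only [List.length_unattach, List.length_cons]
  exact Nat.lt_succ_of_le (le_trans (List.length_filter_le _ _) (by simp))

theorem mem_reps (l : List (List (String × Int))) (x : List (String × Int)) :
    x ∈ reps l ↔ x ∈ l := by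
  suffices h : ∀ n (l : List (List (String × Int))), l.length = n →
      ∀ x, x ∈ reps l ↔ x ∈ l from h _ l rfl x
  intro n
  induction n using Nat.strong_induction_on with
  | _ n ih =>
    intro l hl x
    match l with
    | [] => simp [reps]
    | k :: ks =>
      rw [reps]
      have hlf := List.length_filter_le (fun k' => !(k' == k)) ks
      have hlt : (ks.filter (fun k' => !(k' == k))).length < n := by
        simp at hl; omega
      have ihx := ih _ hlt _ rfl x
      by_cases hx : x = k <;> simp [hx, ihx, List.mem_filter]

theorem nodup_reps (l : List (List (String × Int))) : (reps l).Nodup := by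
  suffices h : ∀ n (l : List (List (String × Int))), l.length = n → (reps l).Nodup
    from h _ l rfl
  intro n
  induction n using Nat.strong_induction_on with
  | _ n ih =>
    intro l hl
    match l with
    | [] => simp [reps]
    | k :: ks =>
      rw [reps]
      have hlf := List.length_filter_le (fun k' => !(k' == k)) ks
      have hlt : (ks.filter (fun k' => !(k' == k))).length < n := by
        simp at hl; omega
      refine List.nodup_cons.mpr ⟨fun hm => ?_, ih _ hlt _ rfl⟩
      have := (mem_reps _ _).mp hm
      simp [List.mem_filter] at this

theorem reps_append (l : List (List (String × Int))) (k : List (String × Int)) :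
    reps (l ++ [k]) = if k ∈ l then reps l else reps l ++ [k] := by
  suffices h : ∀ n (l : List (List (String × Int))), l.length = n →
      ∀ k, reps (l ++ [k]) = if k ∈ l then reps l else reps l ++ [k] from h _ l rfl k
  intro n
  induction n using Nat.strong_induction_on with
  | _ n ih =>
    intro l hl k
    match l with
    | [] => simp [reps]
    | k' :: ks =>
      have hlf := List.length_filter_le (fun k'' => !(k'' == k')) ks
      have hlt : (ks.filter (fun k'' => !(k'' == k'))).length < n := by
        simp at hl; omega
      by_cases hk : k = k'
      · subst hk
        rw [List.cons_append, reps, reps]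
        simp [List.filter_append, List.filter_cons]
      · have hfil : (ks ++ [k]).filter (fun k'' => !(k'' == k')) =
            ks.filter (fun k'' => !(k'' == k')) ++ [k] := by
          simp [List.filter_append, List.filter_cons, hk]
        rw [List.cons_append, reps, hfil, ih _ hlt _ rfl, reps]
        have hmem : k ∈ ks.filter (fun k'' => !(k'' == k')) ↔ k ∈ ks := by
          simp [List.mem_filter, hk]
        by_cases hks : k ∈ ks
        · simp [hmem, hks, hk]
        · simp [hmem, hks, hk, Ne.symm hk]

-- the grouping both programs compute: per distinct key (first-seen order), its members in order
def buckets (l : List (PySem.Dict String Int)) : List (List (PySem.Dict String Int)) :=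
  (reps (l.map pvKey)).map (fun k => l.filter (fun d => pvKey d == k))

theorem pvRemove_spec (pre rest : List (PySem.Dict String Int)) (o : PySem.Dict String Int)
    (hpre : ∀ x ∈ pre, pvEqD x o = false) (hself : pvEqD o o = true) :
    pvRemove (pre ++ o :: rest) o = pre ++ rest := by
  induction pre with
  | nil => simp [pvRemove, hself]
  | cons x xs ih =>
    simp only [List.cons_append, pvRemove, hpre x (by simp)]
    simp only [Bool.false_eq_true, if_false, List.cons.injEq, true_and]
    exact ih (fun y hy => hpre y (by simp [hy]))

theorem pvInner_spec (copy : List (PySem.Dict String Int)) :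
    ∀ (pre : List (PySem.Dict String Int)) (cur : PySem.Dict String Int) (i : Int)
      (grp : List (List (String × Int))),
    cur.keys.Nodup → (∀ x ∈ copy, x.keys.Nodup) →
    (∀ x ∈ pre, x.keys.Nodup) → (∀ x ∈ pre, pvKey x ≠ pvKey cur) →
    pvInner copy (pre ++ copy) cur i grp =
      (grp ++ (copy.filter (fun d => pvKey d == pvKey cur)).map (pvTag i),
       pre ++ copy.filter (fun d => !(pvKey d == pvKey cur))) := by
  induction copy with
  | nil => intro pre cur i grp _ _ _ _; simp [pvInner]
  | cons o rest ih =>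
    intro pre cur i grp hcur hcopy hprend hpre
    have ho : o.keys.Nodup := hcopy o (by simp)
    have hrest : ∀ x ∈ rest, x.keys.Nodup := fun x hx => hcopy x (by simp [hx])
    rw [List.filter_cons, List.filter_cons]
    simp only [pvInner, eqD_eq_beq_key cur o hcur ho]
    by_cases hko : pvKey cur = pvKey o
    · -- equal: o is appended to the group and removed from arr
      have hrem : pvRemove (pre ++ o :: rest) o = pre ++ rest := by
        refine pvRemove_spec pre rest o (fun x hx => ?_) ?_
        · rw [eqD_eq_beq_key x o (hprend x hx) ho]
          exact beq_eq_false_iff_ne.mpr (fun h => hpre x hx (h.trans hko.symm))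
        · rw [eqD_eq_beq_key o o ho ho]; simp
      have hko' : (pvKey cur == pvKey o) = true := beq_iff_eq.mpr hko
      rw [if_pos hko', hrem, ih pre cur i (grp ++ [pvTag i o]) hcur hrest hprend hpre]
      have hok : (pvKey o == pvKey cur) = true := beq_iff_eq.mpr hko.symm
      simp [hok, List.append_assoc]
    · -- not equal: o stays in arr (it moves conceptually into the processed prefix)
      have hne : (pvKey cur == pvKey o) = false := by simp [hko]
      rw [if_neg (by simp [hne])]
      have := ih (pre ++ [o]) cur i grp hcur hrest
        (fun x hx => by
          rcases List.mem_append.mp hx with h | h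
          · exact hprend x h
          · simp at h; subst h; exact ho)
        (fun x hx => by
          rcases List.mem_append.mp hx with h | h
          · exact hpre x h
          · simp at h; subst h; exact fun hc => hko hc.symm)
      rw [List.append_assoc, List.singleton_append] at this
      rw [this]
      have hof : (pvKey o == pvKey cur) = false := by
        simp; exact fun hc => hko hc.symm
      simp [hof, List.append_assoc]

theorem buckets_cons (c : PySem.Dict String Int) (rest : List (PySem.Dict String Int)) :
    buckets (c :: rest) =
      (c :: rest.filter (fun d => pvKey d == pvKey c)) ::
        buckets (rest.filter (fun d => !(pvKey d == pvKey c))) := by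
  unfold buckets
  simp only [List.map_cons]
  rw [reps, List.filter_map, List.map_cons]
  congr 1
  · rw [List.filter_cons, if_pos (by simp)]
  · apply List.map_congr_left
    intro k hk
    have hkmem := (mem_reps _ _).mp hk
    rcases List.mem_map.mp hkmem with ⟨d, hd, rfl⟩
    have hdne : (pvKey d == pvKey c) = false := by
      have := (List.mem_filter.mp hd).2
      simpa using this
    have hkc : (pvKey c == pvKey d) = false := by
      simp at hdne ⊢; exact fun h => hdne h.symm
    rw [List.filter_cons, if_neg (by simp [hkc]), List.filter_filter]
    apply List.filter_congr
    intro x _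
    by_cases hx : pvKey x = pvKey d
    · simp [hx, hdne]
    · simp [hx]

theorem pvOuter_spec (l : List (PySem.Dict String Int)) (i : Int)
    (hnd : ∀ x ∈ l, x.keys.Nodup) :
    pvOuter l i =
      (PySem.List.enumerate (buckets l) i).map (fun ig => ig.2.map (fun d => pvTag ig.1 d)) := by
  suffices h : ∀ n (l : List (PySem.Dict String Int)), l.length = n →
      ∀ i, (∀ x ∈ l, x.keys.Nodup) → pvOuter l i =
        (PySem.List.enumerate (buckets l) i).map (fun ig => ig.2.map (fun d => pvTag ig.1 d))
    from h _ l rfl i hnd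
  intro n
  induction n using Nat.strong_induction_on with
  | _ n ih =>
    intro l hl i hnd
    match l with
    | [] => rw [pvOuter]; simp [buckets, reps, PySem.List.enumerate_nil]
    | c :: rest =>
      rw [pvOuter]
      have hc : c.keys.Nodup := hnd c (by simp)
      have hrest : ∀ x ∈ rest, x.keys.Nodup := fun x hx => hnd x (by simp [hx])
      have hspec := pvInner_spec rest [] c i [pvTag i c] hc hrest (by simp) (by simp)
      rw [List.nil_append] at hspec
      have hfl := List.length_filter_le (fun d => !(pvKey d == pvKey c)) rest
      have hlt : (rest.filter (fun d => !(pvKey d == pvKey c))).length < n := by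
        simp at hl; omega
      rw [buckets_cons, PySem.List.enumerate_cons, List.map_cons]
      simp only [hspec, List.nil_append]
      rw [ih _ hlt _ rfl (i + 1)
        (fun x hx => hrest x (List.mem_of_mem_filter hx))]
      simp

-- appending a dict whose key is already present appends it to that key's bucket
theorem buckets_append_of_mem (p : List (PySem.Dict String Int)) (d : PySem.Dict String Int)
    (n : Nat) (hn : PySem.List.index? (reps (p.map pvKey)) (pvKey d) = some n) :
    buckets (p ++ [d]) = (buckets p).set n ((buckets p).getD n [] ++ [d]) := by
  obtain ⟨hkn, hrepn, -⟩ := PySem.List.getElem_of_index?_eq_some hn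
  have hmem : pvKey d ∈ p.map pvKey := (mem_reps _ _).mp (hrepn ▸ List.getElem_mem hkn)
  have hreps : reps ((p ++ [d]).map pvKey) = reps (p.map pvKey) := by
    have hmap : (p ++ [d]).map pvKey = p.map pvKey ++ [pvKey d] := by simp
    rw [hmap, reps_append, if_pos hmem]
  unfold buckets
  rw [hreps]
  apply List.ext_getElem
  · simp
  · intro j h1 h2
    have hj : j < (reps (p.map pvKey)).length := by simpa using h1
    simp only [List.getElem_map, List.getElem_set]
    by_cases hjn : n = j
    · subst hjn
      rw [if_pos rfl, List.getD_eq_getElem _ _ (by simpa using hkn)]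
      simp only [List.getElem_map]
      rw [List.filter_append, hrepn]
      simp
    · rw [if_neg hjn]
      have hne : (reps (p.map pvKey))[j] ≠ pvKey d := fun he =>
        hjn (((nodup_reps (p.map pvKey)).getElem_inj_iff).mp (hrepn.trans he.symm))
      have hne' : (pvKey d == (reps (p.map pvKey))[j]) = false := by
        simp; exact fun h => hne h.symm
      rw [List.filter_append]
      simp [hne']

-- appending a dict with a fresh key opens a new singleton bucket at the end
theorem buckets_append_of_not_mem (p : List (PySem.Dict String Int))
    (d : PySem.Dict String Int) (hmem : pvKey d ∉ p.map pvKey) :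
    buckets (p ++ [d]) = buckets p ++ [[d]] := by
  have hrepsnew : reps ((p ++ [d]).map pvKey) = reps (p.map pvKey) ++ [pvKey d] := by
    have hmap : (p ++ [d]).map pvKey = p.map pvKey ++ [pvKey d] := by simp
    rw [hmap, reps_append, if_neg hmem]
  unfold buckets
  rw [hrepsnew, List.map_append, List.map_singleton]
  congr 1
  · apply List.map_congr_left
    intro k hk
    have hkne : pvKey d ≠ k := by
      intro he; exact hmem (he ▸ (mem_reps _ _).mp hk)
    rw [List.filter_append]
    simp [hkne]
  · rw [List.filter_append]
    have hnil : p.filter (fun x => pvKey x == pvKey d) = [] := by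
      rw [List.filter_eq_nil_iff]
      intro x hx
      simp
      exact fun he => hmem (he ▸ List.mem_map_of_mem hx)
    simp [hnil]

theorem pvBLoop_spec (rest : List (PySem.Dict String Int)) :
    ∀ (p : List (PySem.Dict String Int)) (table : PySem.Dict (List (String × Int)) Int)
      (groups : List (List (PySem.Dict String Int))),
    (∀ k, table.get? k = (PySem.List.index? (reps (p.map pvKey)) k).map (fun n => (n : Int))) →
    groups = buckets p →
    pvBLoop rest table groups = buckets (p ++ rest) := by
  induction rest with
  | nil => intro p table groups _ hG; simpa [pvBLoop] using hG
  | cons d rest' ih =>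
    intro p table groups hT hG
    rw [show p ++ d :: rest' = (p ++ [d]) ++ rest' by simp]
    simp only [pvBLoop]
    have hcont : table.contains (pvKey d) = decide (pvKey d ∈ p.map pvKey) := by
      rw [PySem.Dict.contains_eq_isSome_get?, hT (pvKey d)]
      rcases h : PySem.List.index? (reps (p.map pvKey)) (pvKey d) with _ | n
      · have hnm : pvKey d ∉ p.map pvKey := fun hm =>
          (PySem.List.index?_eq_none_iff _ _).mp h ((mem_reps _ _).mpr hm)
        simp [hnm]
      · have hsome : (PySem.List.index? (reps (p.map pvKey)) (pvKey d)).isSome = true := by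
          rw [h]; rfl
        have hmem : pvKey d ∈ p.map pvKey :=
          (mem_reps _ _).mp ((PySem.List.index?_isSome_iff _ _).mp hsome)
        simp [hmem, h]
    by_cases hmem : pvKey d ∈ p.map pvKey
    · -- key already seen: append d to its bucket
      rw [hcont, if_pos (by simpa using hmem)]
      obtain ⟨n, hn⟩ : ∃ n, PySem.List.index? (reps (p.map pvKey)) (pvKey d) = some n :=
        Option.isSome_iff_exists.mp
          ((PySem.List.index?_isSome_iff _ _).mpr ((mem_reps _ _).mpr hmem))
      obtain ⟨hkn, hrepn, -⟩ := PySem.List.getElem_of_index?_eq_some hn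
      have hgetD : table.getD (pvKey d) 0 = (n : Int) := by
        rw [PySem.Dict.getD_eq_get?_getD, hT (pvKey d), hn]; rfl
      rw [hgetD, PySem.List.pySetD_natCast, PySem.List.pyGetD_natCast]
      refine ih (p ++ [d]) table _ (fun k' => ?_) ?_
      · rw [hT k']
        congr 2
        have hmap : (p ++ [d]).map pvKey = p.map pvKey ++ [pvKey d] := by simp
        rw [hmap, reps_append, if_pos hmem]
      · rw [hG, buckets_append_of_mem p d n hn]
    · -- new key: new bucket at the end
      rw [hcont, if_neg (by simpa using hmem)]
      have hknr : pvKey d ∉ reps (p.map pvKey) := fun h => hmem ((mem_reps _ _).mp h)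
      have hrepsnew : reps ((p ++ [d]).map pvKey) = reps (p.map pvKey) ++ [pvKey d] := by
        have hmap : (p ++ [d]).map pvKey = p.map pvKey ++ [pvKey d] := by simp
        rw [hmap, reps_append, if_neg hmem]
      refine ih (p ++ [d]) _ _ (fun k' => ?_) ?_
      · rw [hrepsnew, PySem.Dict.get?_insert]
        by_cases hk' : k' = pvKey d
        · subst hk'
          rw [if_pos rfl, PySem.List.index?_append_singleton_self _ _ hknr]
          rw [hG]
          simp [buckets, PySem.List.len_eq]
        · rw [if_neg hk', hT k']
          by_cases hkr : k' ∈ reps (p.map pvKey)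
          · rw [PySem.List.index?_append_of_mem _ hkr]
          · rw [(PySem.List.index?_eq_none_iff _ _).mpr hkr,
              (PySem.List.index?_eq_none_iff _ _).mpr (by simp [hkr, hk'])]
      · rw [hG, buckets_append_of_not_mem p d hmem]

-- ===== VERDICT (by name: the statement is the Claim_ definition above) =====
theorem group_equal_dicts_spec : Claim_equal_group_equal_dicts := by
  intro arr _
  unfold Spec_group_equal_dicts group_equal_dicts group_equal_dicts_alt
  have hnd : ∀ x ∈ arr.map PySem.Dict.ofList, x.keys.Nodup := by
    intro x hx
    rcases List.mem_map.mp hx with ⟨d, _, rfl⟩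
    exact PySem.Dict.nodup_keys_ofList d
  rw [pvOuter_spec _ _ hnd]
  rw [pvBLoop_spec (arr.map PySem.Dict.ofList) [] PySem.Dict.empty []
    (fun k => by simp [PySem.Dict.get?_empty, reps, PySem.List.index?_eq_idxOf?])
    (by simp [buckets, reps])]
  simp
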